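-- pv_equiv track=rewrite | github.com/tomertrassify/qgis-plugin | plugin_sources/max-wild/max_wild_project_status_manager/plugin.py | map_clickup_status_to_plugin
-- ===== SOURCE A (Python) =====
-- CLICKUP_STATUS_ALIASES = {
--     "Neu": ("neu", "to do", "todo", "open"),
--     "in Arbeit": ("in arbeit", "in progress", "in bearbeitung", "working on it"),
--     "Fehlende Betreiber Antwort": (
--         "fehlende betreiber antwort",
--         "awaiting operator response",
--         "waiting for operator response",
--         "operator response missing",
--     ),
--     "Fertig": ("fertig", "done", "complete", "completed", "closed"),
-- }
--
-- def map_clickup_status_to_plugin(status_text):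
--     normalized = str(status_text or "").strip().casefold()
--     if not normalized:
--         return ""
--
--     for plugin_status, aliases in CLICKUP_STATUS_ALIASES.items():
--         if normalized == plugin_status.casefold():
--             return plugin_status
--         if normalized in aliases:
--             return plugin_status
--     return ""
-- ===== SOURCE B (Python) =====
-- CLICKUP_STATUS_ALIASES = {
--     "Neu": ("neu", "to do", "todo", "open"),
--     "in Arbeit": ("in arbeit", "in progress", "in bearbeitung", "working on it"),
--     "Fehlende Betreiber Antwort": (
--         "fehlende betreiber antwort",
--         "awaiting operator response",
--         "waiting for operator response",
--         "operator response missing",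
--     ),
--     "Fertig": ("fertig", "done", "complete", "completed", "closed"),
-- }
--
-- # Flat reverse index built once: casefolded canonical name and every alias -> canonical status.
-- REVERSE = {}
-- for _plugin_status, _aliases in CLICKUP_STATUS_ALIASES.items():
--     REVERSE[_plugin_status.casefold()] = _plugin_status
--     for _alias in _aliases:
--         REVERSE[_alias] = _plugin_status
--
--
-- def map_clickup_status_to_plugin(status_text):
--     normalized = str(status_text or "").strip().casefold()
--     if not normalized:
--         return ""
--     return REVERSE.get(normalized, "")
-- ===== Notes on version B (the rewrite author's own statement) =====
-- stated objective: idiomatic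
-- what changed: Replaces the per-call linear scan over the alias table (equality test then tuple membership per group) with a module-level flat reverse dict built once, so the function body is a single dict lookup.
import Mathlib
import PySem

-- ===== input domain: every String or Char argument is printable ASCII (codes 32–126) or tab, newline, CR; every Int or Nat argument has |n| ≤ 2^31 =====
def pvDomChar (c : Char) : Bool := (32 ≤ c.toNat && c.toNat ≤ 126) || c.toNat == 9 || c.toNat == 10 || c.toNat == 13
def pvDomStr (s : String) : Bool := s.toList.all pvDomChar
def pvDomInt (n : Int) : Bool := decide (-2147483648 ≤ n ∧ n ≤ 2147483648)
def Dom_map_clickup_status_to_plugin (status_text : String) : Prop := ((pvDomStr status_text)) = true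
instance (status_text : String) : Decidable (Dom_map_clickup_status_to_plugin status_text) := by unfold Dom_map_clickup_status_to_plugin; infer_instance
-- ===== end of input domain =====

-- B replaces A's per-call scan of the alias table by a reverse dict built once; single lookup.
-- Python's str.casefold is ported as PySem.Str.lower (exact on the ASCII domain).

-- ===== PORT A =====
-- the module constant CLICKUP_STATUS_ALIASES (dict -> assoc list, insertion order)
def pvTable : List (String × List String) :=
  [("Neu", ["neu", "to do", "todo", "open"]),
   ("in Arbeit", ["in arbeit", "in progress", "in bearbeitung", "working on it"]),
   ("Fehlende Betreiber Antwort",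
      ["fehlende betreiber antwort", "awaiting operator response",
       "waiting for operator response", "operator response missing"]),
   ("Fertig", ["fertig", "done", "complete", "completed", "closed"])]

-- the 'for plugin_status, aliases in CLICKUP_STATUS_ALIASES.items():' loop of A
def pvLoopA (normalized : String) : List (String × List String) → String
  | [] => ""
  | (plugin_status, aliases) :: rest =>
      if normalized = PySem.Str.lower plugin_status then plugin_status
      else if normalized ∈ aliases then plugin_status
      else pvLoopA normalized rest

def map_clickup_status_to_plugin (status_text : String) : String :=
  let normalized := PySem.Str.lower (PySem.Str.strip status_text)
  if normalized = "" then ""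
  else pvLoopA normalized pvTable

-- ===== PORT B =====
-- module-level REVERSE dict of Source B, built once from the table
def pvReverse : PySem.Dict String String :=
  pvTable.foldl
    (fun d p =>
      p.2.foldl (fun d a => d.insert a p.1) (d.insert (PySem.Str.lower p.1) p.1))
    PySem.Dict.empty

def map_clickup_status_to_plugin_alt (status_text : String) : String :=
  let normalized := PySem.Str.lower (PySem.Str.strip status_text)
  if normalized = "" then ""
  else pvReverse.getD normalized ""

-- ===== PRECONDITION & SPEC =====
def Spec_map_clickup_status_to_plugin (status_text : String) (out : String) : Prop := out = map_clickup_status_to_plugin_alt status_text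
instance (status_text : String) (out : String) : Decidable (Spec_map_clickup_status_to_plugin status_text out) := by unfold Spec_map_clickup_status_to_plugin; infer_instance

-- ===== CLAIM (what is proved, stated in full; the proofs are below) =====
def Claim_equal_map_clickup_status_to_plugin : Prop := ∀ (status_text : String), Dom_map_clickup_status_to_plugin status_text → Spec_map_clickup_status_to_plugin status_text (map_clickup_status_to_plugin status_text)

-- ===== LEMMAS AND PROOFS =====

-- the built dict, as a literal
theorem pvReverse_eq : pvReverse = PySem.Dict.mk
    [("neu", "Neu"), ("to do", "Neu"), ("todo", "Neu"), ("open", "Neu"),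
     ("in arbeit", "in Arbeit"), ("in progress", "in Arbeit"),
     ("in bearbeitung", "in Arbeit"), ("working on it", "in Arbeit"),
     ("fehlende betreiber antwort", "Fehlende Betreiber Antwort"),
     ("awaiting operator response", "Fehlende Betreiber Antwort"),
     ("waiting for operator response", "Fehlende Betreiber Antwort"),
     ("operator response missing", "Fehlende Betreiber Antwort"),
     ("fertig", "Fertig"), ("done", "Fertig"), ("complete", "Fertig"),
     ("completed", "Fertig"), ("closed", "Fertig")] := by decide

theorem pvLoopA_eq_lookup (n : String) : pvLoopA n pvTable = pvReverse.getD n "" := by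
  rw [pvReverse_eq]
  by_cases h0 : n = "neu"
  · subst h0; decide
  by_cases h1 : n = "to do"
  · subst h1; decide
  by_cases h2 : n = "todo"
  · subst h2; decide
  by_cases h3 : n = "open"
  · subst h3; decide
  by_cases h4 : n = "in arbeit"
  · subst h4; decide
  by_cases h5 : n = "in progress"
  · subst h5; decide
  by_cases h6 : n = "in bearbeitung"
  · subst h6; decide
  by_cases h7 : n = "working on it"
  · subst h7; decide
  by_cases h8 : n = "fehlende betreiber antwort"
  · subst h8; decide
  by_cases h9 : n = "awaiting operator response"
  · subst h9; decide
  by_cases h10 : n = "waiting for operator response"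
  · subst h10; decide
  by_cases h11 : n = "operator response missing"
  · subst h11; decide
  by_cases h12 : n = "fertig"
  · subst h12; decide
  by_cases h13 : n = "done"
  · subst h13; decide
  by_cases h14 : n = "complete"
  · subst h14; decide
  by_cases h15 : n = "completed"
  · subst h15; decide
  by_cases h16 : n = "closed"
  · subst h16; decide
  simp [pvTable, pvLoopA, PySem.Dict.getD, PySem.Dict.get?_mk_cons,
    PySem.Dict.get?,
    (show PySem.Str.lower "Neu" = "neu" from by decide),
    (show PySem.Str.lower "in Arbeit" = "in arbeit" from by decide),
    (show PySem.Str.lower "Fehlende Betreiber Antwort" = "fehlende betreiber antwort" from by decide),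
    (show PySem.Str.lower "Fertig" = "fertig" from by decide),
    h0, (Ne.symm h0), h1, (Ne.symm h1), h2, (Ne.symm h2), h3, (Ne.symm h3), h4, (Ne.symm h4), h5, (Ne.symm h5), h6, (Ne.symm h6), h7, (Ne.symm h7), h8, (Ne.symm h8), h9, (Ne.symm h9), h10, (Ne.symm h10), h11, (Ne.symm h11), h12, (Ne.symm h12), h13, (Ne.symm h13), h14, (Ne.symm h14), h15, (Ne.symm h15), h16, (Ne.symm h16)]

-- ===== VERDICT (by name: the statement is the Claim_ definition above) =====
theorem map_clickup_status_to_plugin_spec : Claim_equal_map_clickup_status_to_plugin := by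
  intro s _
  unfold Spec_map_clickup_status_to_plugin map_clickup_status_to_plugin map_clickup_status_to_plugin_alt
  by_cases h : PySem.Str.lower (PySem.Str.strip s) = "" <;>
    simp [h, pvLoopA_eq_lookup]
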